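-- pv_equiv track=rewrite | github.com/K0DA-PARALLAXStudio/TensorSort_Model_Installer-Comfyui | _Module/modul1_mainmodels.py | detect_base_model_from_keys
-- ===== SOURCE A (Python) =====
-- def detect_base_model_from_keys(keys):
--     """Erkennt Base Model aus Key Patterns (Fallback)"""
--
--     # Z-Image: context_refiner ODER cap_embedder (UNIQUE! HÖCHSTE PRIORITÄT!)
--     if any("context_refiner" in k for k in keys):
--         return "ZImage"  # Basis-Erkennung, Variante aus Filename
--
--     if any("cap_embedder" in k for k in keys):
--         return "ZImage"
--
--     # Alternative: Qwen3 Text Encoder Check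
--     if any("qwen3_4b" in k for k in keys):
--         return "ZImage"
--
--     # Qwen-Image-Edit: txt_in OHNE double_blocks/single_blocks (die hat Flux!)
--     # WICHTIG: Flux hat auch txt_in, aber zusätzlich double_blocks/single_blocks
--     has_txt_in = any("model.diffusion_model.txt_in" in k for k in keys)
--     has_flux_structure = any("double_blocks" in k or "single_blocks" in k for k in keys)
--     if has_txt_in and not has_flux_structure:
--         return "QwenImageEdit"
--
--     # Lotus-Depth: class_embedding + down_blocks.*.attentions (UNIQUE Kombination!)
--     # UNet-ähnliche Struktur aber für Depth Estimation
--     has_class_embedding = any("class_embedding" in k for k in keys)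
--     has_down_attentions = any("down_blocks." in k and ".attentions." in k for k in keys)
--     if has_class_embedding and has_down_attentions:
--         return "LotusDepth"
--
--     # WAN Video Models: blocks.*.cross_attn OHNE double_blocks/single_blocks
--     # WICHTIG: VOR Flux prüfen! WAN hat auch "blocks." aber andere Struktur
--     has_wan_blocks = any("blocks." in k and "cross_attn" in k for k in keys)
--     has_flux_blocks = any("double_blocks" in k or "single_blocks" in k for k in keys)
--     if has_wan_blocks and not has_flux_blocks:
--         # WAN erkannt - Typ (I2V vs T2V) später bestimmen
--         return "WAN"
--
--     # Flux: double_blocks, single_blocks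
--     if any("double_blocks" in k or "single_blocks" in k for k in keys):
--         return "FluxD"  # Default to dev
--
--     # SDXL/Pony: conditioner.embedders
--     if any("conditioner.embedders" in k for k in keys):
--         return "SDXL"  # Kann nicht zwischen SDXL/Pony unterscheiden
--
--     # SD15/SD21: cond_stage_model.transformer
--     if any("cond_stage_model.transformer" in k for k in keys):
--         return "SD15"  # Default
--
--     return None
-- ===== SOURCE B (Python) =====
-- def detect_base_model_from_keys(keys):
--     """Erkennt Base Model aus Key Patterns (Fallback) - single pass over keys."""
--     cr = cap = q3 = txt = flux = cls = down = wan = sdxl = sd15 = False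
--     for k in keys:
--         cr = cr or "context_refiner" in k
--         cap = cap or "cap_embedder" in k
--         q3 = q3 or "qwen3_4b" in k
--         txt = txt or "model.diffusion_model.txt_in" in k
--         flux = flux or "double_blocks" in k or "single_blocks" in k
--         cls = cls or "class_embedding" in k
--         down = down or ("down_blocks." in k and ".attentions." in k)
--         wan = wan or ("blocks." in k and "cross_attn" in k)
--         sdxl = sdxl or "conditioner.embedders" in k
--         sd15 = sd15 or "cond_stage_model.transformer" in k
--     if cr:
--         return "ZImage"
--     if cap:
--         return "ZImage"
--     if q3:
--         return "ZImage"
--     if txt and not flux: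
--         return "QwenImageEdit"
--     if cls and down:
--         return "LotusDepth"
--     if wan and not flux:
--         return "WAN"
--     if flux:
--         return "FluxD"
--     if sdxl:
--         return "SDXL"
--     if sd15:
--         return "SD15"
--     return None
-- ===== Notes on version B (the rewrite author's own statement) =====
-- stated objective: faster
-- what changed: Replaces A's up-to-twelve separate any(...) generator scans over keys with one explicit loop that accumulates ten boolean pattern flags, followed by the same priority cascade on the flags.
import Mathlib
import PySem

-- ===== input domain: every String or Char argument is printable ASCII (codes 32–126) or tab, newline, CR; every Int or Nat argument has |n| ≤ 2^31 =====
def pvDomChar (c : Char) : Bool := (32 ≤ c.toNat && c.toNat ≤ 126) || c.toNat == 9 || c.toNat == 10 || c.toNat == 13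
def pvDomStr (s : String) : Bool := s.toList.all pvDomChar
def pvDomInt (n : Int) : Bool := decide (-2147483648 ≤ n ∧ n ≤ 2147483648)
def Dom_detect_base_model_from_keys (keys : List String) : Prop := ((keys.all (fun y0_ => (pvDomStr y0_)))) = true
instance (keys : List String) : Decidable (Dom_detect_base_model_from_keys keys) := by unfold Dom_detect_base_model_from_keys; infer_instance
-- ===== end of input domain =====

-- B replaces A's repeated any(...) scans with one accumulating pass over keys; same cascade, same results (alternative decomposition, no speed claim).

-- ===== PORT A =====
def detect_base_model_from_keys (keys : List String) : Option String :=
  if keys.any (fun k => PySem.Str.isIn "context_refiner" k) then some "ZImage"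
  else if keys.any (fun k => PySem.Str.isIn "cap_embedder" k) then some "ZImage"
  else if keys.any (fun k => PySem.Str.isIn "qwen3_4b" k) then some "ZImage"
  else
    let has_txt_in := keys.any (fun k => PySem.Str.isIn "model.diffusion_model.txt_in" k)
    let has_flux_structure := keys.any (fun k => PySem.Str.isIn "double_blocks" k || PySem.Str.isIn "single_blocks" k)
    if has_txt_in && !has_flux_structure then some "QwenImageEdit"
    else
      let has_class_embedding := keys.any (fun k => PySem.Str.isIn "class_embedding" k)
      let has_down_attentions := keys.any (fun k => PySem.Str.isIn "down_blocks." k && PySem.Str.isIn ".attentions." k)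
      if has_class_embedding && has_down_attentions then some "LotusDepth"
      else
        let has_wan_blocks := keys.any (fun k => PySem.Str.isIn "blocks." k && PySem.Str.isIn "cross_attn" k)
        let has_flux_blocks := keys.any (fun k => PySem.Str.isIn "double_blocks" k || PySem.Str.isIn "single_blocks" k)
        if has_wan_blocks && !has_flux_blocks then some "WAN"
        else if keys.any (fun k => PySem.Str.isIn "double_blocks" k || PySem.Str.isIn "single_blocks" k) then some "FluxD"
        else if keys.any (fun k => PySem.Str.isIn "conditioner.embedders" k) then some "SDXL"
        else if keys.any (fun k => PySem.Str.isIn "cond_stage_model.transformer" k) then some "SD15"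
        else none

-- ===== PORT B =====
structure PatternFlags where
  cr : Bool
  cap : Bool
  q3 : Bool
  txt : Bool
  flux : Bool
  cls : Bool
  down : Bool
  wan : Bool
  sdxl : Bool
  sd15 : Bool
deriving DecidableEq, Repr

def flagsStep (f : PatternFlags) (k : String) : PatternFlags :=
  { cr := f.cr || PySem.Str.isIn "context_refiner" k
    cap := f.cap || PySem.Str.isIn "cap_embedder" k
    q3 := f.q3 || PySem.Str.isIn "qwen3_4b" k
    txt := f.txt || PySem.Str.isIn "model.diffusion_model.txt_in" k
    flux := f.flux || PySem.Str.isIn "double_blocks" k || PySem.Str.isIn "single_blocks" k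
    cls := f.cls || PySem.Str.isIn "class_embedding" k
    down := f.down || (PySem.Str.isIn "down_blocks." k && PySem.Str.isIn ".attentions." k)
    wan := f.wan || (PySem.Str.isIn "blocks." k && PySem.Str.isIn "cross_attn" k)
    sdxl := f.sdxl || PySem.Str.isIn "conditioner.embedders" k
    sd15 := f.sd15 || PySem.Str.isIn "cond_stage_model.transformer" k }

def detect_base_model_from_keys_alt (keys : List String) : Option String :=
  let f := keys.foldl flagsStep ⟨false, false, false, false, false, false, false, false, false, false⟩
  if f.cr then some "ZImage"
  else if f.cap then some "ZImage"
  else if f.q3 then some "ZImage"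
  else if f.txt && !f.flux then some "QwenImageEdit"
  else if f.cls && f.down then some "LotusDepth"
  else if f.wan && !f.flux then some "WAN"
  else if f.flux then some "FluxD"
  else if f.sdxl then some "SDXL"
  else if f.sd15 then some "SD15"
  else none

-- ===== PRECONDITION & SPEC =====
def Spec_detect_base_model_from_keys (keys : List String) (out : Option String) : Prop := out = detect_base_model_from_keys_alt keys
instance (keys : List String) (out : Option String) : Decidable (Spec_detect_base_model_from_keys keys out) := by unfold Spec_detect_base_model_from_keys; infer_instance

-- ===== CLAIM (what is proved, stated in full; the proofs are below) =====
def Claim_equal_detect_base_model_from_keys : Prop := ∀ (keys : List String), Dom_detect_base_model_from_keys keys → Spec_detect_base_model_from_keys keys (detect_base_model_from_keys keys)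

-- ===== LEMMAS AND PROOFS =====

-- The accumulated flags are exactly the any-scans A performs.
theorem foldl_flagsStep (keys : List String) (f : PatternFlags) :
    keys.foldl flagsStep f =
      { cr := f.cr || keys.any (fun k => PySem.Str.isIn "context_refiner" k)
        cap := f.cap || keys.any (fun k => PySem.Str.isIn "cap_embedder" k)
        q3 := f.q3 || keys.any (fun k => PySem.Str.isIn "qwen3_4b" k)
        txt := f.txt || keys.any (fun k => PySem.Str.isIn "model.diffusion_model.txt_in" k)
        flux := f.flux || keys.any (fun k => PySem.Str.isIn "double_blocks" k || PySem.Str.isIn "single_blocks" k)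
        cls := f.cls || keys.any (fun k => PySem.Str.isIn "class_embedding" k)
        down := f.down || keys.any (fun k => PySem.Str.isIn "down_blocks." k && PySem.Str.isIn ".attentions." k)
        wan := f.wan || keys.any (fun k => PySem.Str.isIn "blocks." k && PySem.Str.isIn "cross_attn" k)
        sdxl := f.sdxl || keys.any (fun k => PySem.Str.isIn "conditioner.embedders" k)
        sd15 := f.sd15 || keys.any (fun k => PySem.Str.isIn "cond_stage_model.transformer" k) } := by
  induction keys generalizing f with
  | nil => simp
  | cons k t ih =>
    simp only [List.foldl_cons, List.any_cons, ih, flagsStep, Bool.or_assoc]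

-- ===== VERDICT (by name: the statement is the Claim_ definition above) =====
theorem detect_base_model_from_keys_spec : Claim_equal_detect_base_model_from_keys := by
  intro keys _
  unfold Spec_detect_base_model_from_keys detect_base_model_from_keys detect_base_model_from_keys_alt
  rw [foldl_flagsStep]
  simp
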